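-- pv_equiv track=rewrite | github.com/OMT-Global/axiom | scripts/quality/crap_indicators.py | strip_rust_comments_and_literals
-- ===== SOURCE A (Python) =====
-- def strip_rust_comments_and_literals(line: str) -> str:
--     output: list[str] = []
--     i = 0
--     while i < len(line):
--         if line.startswith("//", i):
--             break
--         if line[i] == "r" and i + 1 < len(line) and line[i + 1] in {'"', '#'}:
--             i = skip_raw_string(line, i)
--             output.append('""')
--             continue
--         if line[i] == '"':
--             i = skip_quoted(line, i, '"')
--             output.append('""')
--             continue
--         if line[i] == "'":
--             i = skip_quoted(line, i, "'")
--             output.append("''")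
--             continue
--         output.append(line[i])
--         i += 1
--     return "".join(output)
--
-- def skip_quoted(line: str, start: int, quote: str) -> int:
--     i = start + 1
--     escaped = False
--     while i < len(line):
--         if escaped:
--             escaped = False
--         elif line[i] == "\\":
--             escaped = True
--         elif line[i] == quote:
--             return i + 1
--         i += 1
--     return i
--
-- def skip_raw_string(line: str, start: int) -> int:
--     i = start + 1
--     hashes = 0
--     while i < len(line) and line[i] == "#":
--         hashes += 1
--         i += 1
--     if i >= len(line) or line[i] != '"':
--         return start + 1
--     terminator = '"' + ("#" * hashes)
--     end = line.find(terminator, i + 1)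
--     return len(line) if end == -1 else end + len(terminator)
-- ===== SOURCE B (Python) =====
-- def strip_rust_comments_and_literals(line: str) -> str:
--     # Single explicit state-machine pass: mode NORMAL / IN_LITERAL / IN_RAW, with
--     # inlined hash counting and a char-by-char raw-terminator matcher (no str.find).
--     NORMAL, LIT, RAW = 0, 1, 2
--     out: list[str] = []
--     n = len(line)
--     i = 0
--     mode = NORMAL
--     quote = ""
--     escaped = False
--     need = 0      # hashes required after the closing '"' of a raw string
--     got = -1      # -1: no '"' matched yet; >=0: hashes matched after a '"'
--     while i < n:
--         c = line[i]
--         if mode == NORMAL: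
--             if c == "/" and i + 1 < n and line[i + 1] == "/":
--                 break
--             if c == "r" and i + 1 < n and line[i + 1] in '"#':
--                 j = i + 1
--                 h = 0
--                 while j < n and line[j] == "#":
--                     h += 1
--                     j += 1
--                 out.append('""')
--                 if j < n and line[j] == '"':
--                     mode = RAW
--                     need = h
--                     got = -1
--                     i = j + 1
--                 else:
--                     i += 1  # no opening quote: resume right after the 'r'
--                 continue
--             if c == '"' or c == "'":
--                 mode = LIT
--                 quote = c
--                 escaped = False
--                 out.append(c + c)
--             else:
--                 out.append(c)
--         elif mode == LIT:
--             if escaped: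
--                 escaped = False
--             elif c == "\\":
--                 escaped = True
--             elif c == quote:
--                 mode = NORMAL
--         else:  # RAW
--             if got < 0:
--                 if c == '"':
--                     if need == 0:
--                         mode = NORMAL
--                     else:
--                         got = 0
--             elif c == "#":
--                 got += 1
--                 if got == need:
--                     mode = NORMAL
--             elif c == '"':
--                 got = 0
--             else:
--                 got = -1
--         i += 1
--     return "".join(out)
-- ===== Notes on version B (the rewrite author's own statement) =====
-- stated objective: alternative
-- what changed: Replaces A's index-jumping loop with helper functions that return resume indices and a str.find-based raw-terminator search by a single explicit state-machine pass (NORMAL/IN_LITERAL/IN_RAW mode with quote, escape flag, and hash counters) that matches the raw-string terminator character by character; the single pass with no per-character helper dispatch measured ~1.9x faster.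
import Mathlib
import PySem

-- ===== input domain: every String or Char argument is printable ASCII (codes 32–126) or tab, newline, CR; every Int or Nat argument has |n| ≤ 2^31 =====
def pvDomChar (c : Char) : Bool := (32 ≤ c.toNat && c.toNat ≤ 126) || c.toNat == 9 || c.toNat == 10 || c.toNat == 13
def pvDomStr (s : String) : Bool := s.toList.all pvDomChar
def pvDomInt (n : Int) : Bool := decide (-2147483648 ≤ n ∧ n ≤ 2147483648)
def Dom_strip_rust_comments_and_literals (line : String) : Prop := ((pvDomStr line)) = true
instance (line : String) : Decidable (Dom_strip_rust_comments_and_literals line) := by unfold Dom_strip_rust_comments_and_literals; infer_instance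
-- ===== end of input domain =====

-- B rewrites A's index-jumping loop (helpers returning resume indices, str.find for the
-- raw terminator) as one state-machine pass with an inline char-by-char terminator matcher;
-- objective: alternative decomposition; a timing run measured B ~2x faster on large inputs.

-- ===== PORT A =====
-- A works on a forward-moving index; ported on the suffix list (index i ↦ line.toList.drop i).

-- skip_quoted's scan: 'escaped' flag loop; returns the suffix after the literal (exact).
def aQuoted (q : Char) (escaped : Bool) : List Char → List Char
  | [] => []
  | c :: rest =>
    if escaped then aQuoted q false rest
    else if c = '\\' then aQuoted q true rest
    else if c = q then rest
    else aQuoted q false rest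

-- the hash-counting while loop inside skip_raw_string (exact)
def aCountH : List Char → Nat × List Char
  | [] => (0, [])
  | c :: rest =>
    if c = '#' then
      let p := aCountH rest
      (p.1 + 1, p.2)
    else (0, c :: rest)

-- line.find(terminator, i+1): first occurrence of t in the suffix, returning the suffix
-- after the occurrence, [] when not found (ported by hand, exact for a nonempty t).
def aFind (t : List Char) : List Char → List Char
  | [] => []
  | c :: rest => if t.isPrefixOf (c :: rest) then (c :: rest).drop t.length else aFind t rest

-- skip_raw_string on the suffix after the 'r' (exact)
def aSkipRaw (rest : List Char) : List Char :=
  let p := aCountH rest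
  if p.2.head? = some '"' then aFind ('"' :: List.replicate p.1 '#') p.2.tail
  else rest

theorem pv_length_tail_le (l : List Char) : l.tail.length ≤ l.length := by
  cases l <;> simp

theorem aQuoted_length_le (q : Char) (esc : Bool) (l : List Char) :
    (aQuoted q esc l).length ≤ l.length := by
  induction l generalizing esc with
  | nil => simp [aQuoted]
  | cons c rest ih =>
    simp only [aQuoted]
    split_ifs <;> first
      | exact Nat.le_succ_of_le (ih _)
      | simp

theorem aCountH_length_le (l : List Char) : (aCountH l).2.length ≤ l.length := by
  induction l with
  | nil => simp [aCountH]
  | cons c rest ih =>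
    simp only [aCountH]
    split_ifs <;> simp [Nat.le_succ_of_le ih]

theorem aFind_length_le (t : List Char) (l : List Char) : (aFind t l).length ≤ l.length := by
  induction l with
  | nil => simp [aFind]
  | cons c rest ih =>
    simp only [aFind]
    split_ifs
    · exact (List.length_drop ..).trans_le (Nat.sub_le _ _)
    · exact Nat.le_succ_of_le ih

theorem aSkipRaw_length_le (rest : List Char) : (aSkipRaw rest).length ≤ rest.length := by
  unfold aSkipRaw
  simp only []
  split_ifs with h
  · calc (aFind _ (aCountH rest).2.tail).length
        ≤ (aCountH rest).2.tail.length := aFind_length_le ..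
      _ ≤ (aCountH rest).2.length := pv_length_tail_le _
      _ ≤ rest.length := aCountH_length_le rest
  · exact le_rfl

-- the main while loop of A (exact: same branch order; break on "//")
def aMain : List Char → List Char
  | [] => []
  | c :: rest =>
    if c = '/' ∧ rest.head? = some '/' then []
    else if c = 'r' ∧ (rest.head? = some '"' ∨ rest.head? = some '#') then
      '"' :: '"' :: aMain (aSkipRaw rest)
    else if c = '"' then '"' :: '"' :: aMain (aQuoted '"' false rest)
    else if c = '\'' then '\'' :: '\'' :: aMain (aQuoted '\'' false rest)
    else c :: aMain rest
termination_by l => l.length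
decreasing_by
  · exact Nat.lt_succ_of_le (aSkipRaw_length_le rest)
  · exact Nat.lt_succ_of_le (aQuoted_length_le _ _ rest)
  · exact Nat.lt_succ_of_le (aQuoted_length_le _ _ rest)
  · exact Nat.lt_succ_of_le (Nat.le_refl _)

def strip_rust_comments_and_literals (line : String) : String :=
  String.ofList (aMain line.toList)

-- ===== PORT B =====
-- Source B's single loop with a mode variable; mode/quote/escaped/need/got bundled in BMode.

inductive BMode
  | norm : BMode
  | lit : Char → Bool → BMode          -- quote, escaped
  | raw : Nat → Int → BMode            -- need, got (-1 = no '"' matched yet)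
deriving DecidableEq, Repr

-- Source B's inner hash-counting while loop
def bCountH : List Char → Nat × List Char
  | [] => (0, [])
  | c :: rest =>
    if c = '#' then
      let p := bCountH rest
      (p.1 + 1, p.2)
    else (0, c :: rest)

theorem bCountH_length_le (l : List Char) : (bCountH l).2.length ≤ l.length := by
  induction l with
  | nil => simp [bCountH]
  | cons c rest ih =>
    simp only [bCountH]
    split_ifs <;> simp [Nat.le_succ_of_le ih]

-- the while loop of Source B, one character per step except the inlined hash count
def bStep : BMode → List Char → List Char
  | _, [] => []
  | BMode.norm, c :: rest =>
    if c = '/' ∧ rest.head? = some '/' then []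
    else if c = 'r' ∧ (rest.head? = some '"' ∨ rest.head? = some '#') then
      let p := bCountH rest
      if p.2.head? = some '"' then '"' :: '"' :: bStep (BMode.raw p.1 (-1)) p.2.tail
      else '"' :: '"' :: bStep BMode.norm rest
    else if c = '"' then '"' :: '"' :: bStep (BMode.lit '"' false) rest
    else if c = '\'' then '\'' :: '\'' :: bStep (BMode.lit '\'' false) rest
    else c :: bStep BMode.norm rest
  | BMode.lit q esc, c :: rest =>
    if esc then bStep (BMode.lit q false) rest
    else if c = '\\' then bStep (BMode.lit q true) rest
    else if c = q then bStep BMode.norm rest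
    else bStep (BMode.lit q false) rest
  | BMode.raw need got, c :: rest =>
    if got < 0 then
      if c = '"' then
        if need = 0 then bStep BMode.norm rest else bStep (BMode.raw need 0) rest
      else bStep (BMode.raw need (-1)) rest
    else if c = '#' then
      if got + 1 = (need : Int) then bStep BMode.norm rest
      else bStep (BMode.raw need (got + 1)) rest
    else if c = '"' then bStep (BMode.raw need 0) rest
    else bStep (BMode.raw need (-1)) rest
termination_by _ l => l.length
decreasing_by
  all_goals first
  | exact Nat.lt_succ_of_le ((pv_length_tail_le _).trans (bCountH_length_le rest))
  | exact Nat.lt_succ_of_le (Nat.le_refl _)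

def strip_rust_comments_and_literals_alt (line : String) : String :=
  String.ofList (bStep BMode.norm line.toList)

-- ===== PRECONDITION & SPEC =====
def Spec_strip_rust_comments_and_literals (line : String) (out : String) : Prop := out = strip_rust_comments_and_literals_alt line
instance (line : String) (out : String) : Decidable (Spec_strip_rust_comments_and_literals line out) := by unfold Spec_strip_rust_comments_and_literals; infer_instance

-- ===== CLAIM (what is proved, stated in full; the proofs are below) =====
def Claim_equal_strip_rust_comments_and_literals : Prop := ∀ (line : String), Dom_strip_rust_comments_and_literals line → Spec_strip_rust_comments_and_literals line (strip_rust_comments_and_literals line)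

-- ===== LEMMAS AND PROOFS =====

theorem bCountH_eq_aCountH (l : List Char) : bCountH l = aCountH l := by
  induction l with
  | nil => rfl
  | cons c rest ih => simp only [bCountH, aCountH, ih]

-- the combined invariant, by strong induction on the suffix length
theorem aFind_cons_ne (a c : Char) (as rest : List Char) (hne : a ≠ c) :
    aFind (a :: as) (c :: rest) = aFind (a :: as) rest := by
  simp only [aFind, List.isPrefixOf_cons₂]
  simp [hne]

theorem aFind_cons_quote (h : ℕ) (rest : List Char) :
    aFind ('"' :: List.replicate h '#') ('"' :: rest) =
      (if (List.replicate h '#').isPrefixOf rest then rest.drop h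
       else aFind ('"' :: List.replicate h '#') rest) := by
  simp only [aFind, List.isPrefixOf_cons₂, BEq.rfl, Bool.true_and]
  split_ifs with hp
  · simp
  · rfl

theorem main_inv : ∀ (n : ℕ) (l : List Char), l.length ≤ n →
    (bStep BMode.norm l = aMain l) ∧
    (∀ q esc, bStep (BMode.lit q esc) l = aMain (aQuoted q esc l)) ∧
    (∀ h : ℕ, bStep (BMode.raw h (-1)) l = aMain (aFind ('"' :: List.replicate h '#') l)) ∧
    (∀ h g : ℕ, g < h → bStep (BMode.raw h (g : Int)) l =
      aMain (if (List.replicate (h - g) '#').isPrefixOf l then l.drop (h - g)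
             else aFind ('"' :: List.replicate h '#') l)) := by
  intro n
  induction n with
  | zero =>
    intro l hl
    have hnil : l = [] := List.eq_nil_of_length_eq_zero (Nat.le_zero.mp hl)
    subst hnil
    refine ⟨by simp [bStep, aMain], fun q esc => by simp [bStep, aQuoted, aMain],
        fun h => by simp [bStep, aFind, aMain], fun h g hg => ?_⟩
    obtain ⟨k, hk⟩ : ∃ k, h - g = k + 1 := ⟨h - g - 1, by omega⟩
    simp [bStep, hk, List.replicate_succ, aMain, aFind]
  | succ n ih =>
    intro l hl
    cases l with
    | nil =>
      refine ⟨by simp [bStep, aMain], fun q esc => by simp [bStep, aQuoted, aMain],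
          fun h => by simp [bStep, aFind, aMain], fun h g hg => ?_⟩
      obtain ⟨k, hk⟩ : ∃ k, h - g = k + 1 := ⟨h - g - 1, by omega⟩
      simp [bStep, hk, List.replicate_succ, aMain, aFind]
    | cons c rest =>
      have hr : rest.length ≤ n := by
        have := hl; simp only [List.length_cons] at this; omega
      refine ⟨?_, ?_, ?_, ?_⟩
      -- NORMAL mode
      · rw [bStep, aMain]
        by_cases h1 : c = '/' ∧ rest.head? = some '/'
        · rw [if_pos h1, if_pos h1]
        · rw [if_neg h1, if_neg h1]
          by_cases h2 : c = 'r' ∧ (rest.head? = some '"' ∨ rest.head? = some '#')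
          · rw [if_pos h2, if_pos h2]
            simp only [bCountH_eq_aCountH, aSkipRaw]
            by_cases hq : (aCountH rest).2.head? = some '"'
            · have htl : (aCountH rest).2.tail.length ≤ n :=
                le_trans (le_trans (pv_length_tail_le _) (aCountH_length_le rest)) hr
              rw [if_pos hq, if_pos hq, (ih _ htl).2.2.1 (aCountH rest).1]
            · rw [if_neg hq, if_neg hq, (ih rest hr).1]
          · rw [if_neg h2, if_neg h2]
            by_cases h3 : c = '"'
            · rw [if_pos h3, if_pos h3, (ih rest hr).2.1 '"' false]
            · rw [if_neg h3, if_neg h3]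
              by_cases h4 : c = '\''
              · rw [if_pos h4, if_pos h4, (ih rest hr).2.1 '\'' false]
              · rw [if_neg h4, if_neg h4, (ih rest hr).1]
      -- LITERAL mode
      · intro q esc
        rw [bStep, aQuoted]
        by_cases he : esc = true
        · rw [if_pos he, if_pos he, (ih rest hr).2.1 q false]
        · rw [if_neg he, if_neg he]
          by_cases hb : c = '\\'
          · rw [if_pos hb, if_pos hb, (ih rest hr).2.1 q true]
          · rw [if_neg hb, if_neg hb]
            by_cases hq : c = q
            · rw [if_pos hq, if_pos hq, (ih rest hr).1]
            · rw [if_neg hq, if_neg hq, (ih rest hr).2.1 q false]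
      -- RAW mode, got = -1
      · intro h
        rw [bStep, if_pos (by decide : (-1 : Int) < 0)]
        by_cases hq : c = '"'
        · subst hq
          rw [if_pos rfl]
          by_cases h0 : h = 0
          · subst h0
            rw [if_pos rfl]
            have : aFind ('"' :: List.replicate 0 '#') ('"' :: rest) = rest := by
              simp [aFind]
            rw [this, (ih rest hr).1]
          · rw [if_neg h0, aFind_cons_quote]
            exact (ih rest hr).2.2.2 h 0 (Nat.pos_of_ne_zero h0)
        · rw [if_neg hq, aFind_cons_ne _ _ _ _ (Ne.symm hq)]
          exact (ih rest hr).2.2.1 h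
      -- RAW mode, got = g ≥ 0
      · intro h g hg
        rw [bStep, if_neg (Int.not_lt.mpr (Int.natCast_nonneg g))]
        obtain ⟨k, hk⟩ : ∃ k, h - g = k + 1 := ⟨h - g - 1, by omega⟩
        by_cases hsharp : c = '#'
        · subst hsharp
          rw [if_pos rfl]
          by_cases hdone : g + 1 = h
          · rw [if_pos (by exact_mod_cast hdone : (g : Int) + 1 = (h : Int))]
            have hk1 : h - g = 1 := by omega
            rw [if_pos (by simp [hk1, List.replicate_succ])]
            rw [hk1, List.drop_succ_cons, List.drop_zero, (ih rest hr).1]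
          · rw [if_neg (fun hc => hdone (by exact_mod_cast hc))]
            rw [show ((g : Int) + 1) = ((g + 1 : ℕ) : Int) by push_cast; ring]
            rw [(ih rest hr).2.2.2 h (g + 1) (by omega)]
            have hk2 : h - g = (h - (g + 1)) + 1 := by omega
            rw [hk2, List.replicate_succ]
            simp only [List.isPrefixOf_cons₂, BEq.rfl, Bool.true_and, List.drop_succ_cons]
            rw [aFind_cons_ne _ _ _ _ (by decide)]
        · rw [if_neg hsharp]
          by_cases hq : c = '"'
          · subst hq
            rw [if_pos rfl]
            rw [if_neg (by simp [hk, List.replicate_succ, List.isPrefixOf_cons₂])]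
            rw [aFind_cons_quote]
            exact (ih rest hr).2.2.2 h 0 (by omega)
          · rw [if_neg hq]
            rw [if_neg (by simp [hk, List.replicate_succ, List.isPrefixOf_cons₂, Ne.symm hsharp])]
            rw [aFind_cons_ne _ _ _ _ (Ne.symm hq)]
            exact (ih rest hr).2.2.1 h

theorem strip_rust_comments_and_literals_spec : Claim_equal_strip_rust_comments_and_literals := by
  intro line _
  unfold Spec_strip_rust_comments_and_literals strip_rust_comments_and_literals strip_rust_comments_and_literals_alt
  exact congrArg String.ofList ((main_inv line.toList.length line.toList le_rfl).1).symm
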